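-- pv_equiv track=rewrite | github.com/vyalsgh-tech/my-timetable-next | tools/step25_fix_append_and_inline_memo.py | remove_method
-- ===== SOURCE A (Python) =====
-- def remove_method(text, name):
--     start = text.find(f'    def {name}(')
--     if start == -1:
--         return text
--     candidates = []
--     for marker in ['\n    def ', '\n    # ==========================================']:
--         pos = text.find(marker, start + 10)
--         if pos != -1:
--             candidates.append(pos)
--     if not candidates:
--         return text
--     return text[:start] + text[min(candidates):]
-- ===== SOURCE B (Python) =====
-- def remove_method(text, name):
--     # Single forward scan over newline positions instead of two independent
--     # text.find calls plus min().
--     start = text.find('    def %s(' % name)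
--     if start == -1:
--         return text
--     bar = '    # ' + '=' * 42
--     for p in range(start + 10, len(text)):
--         if text[p] == '\n' and (text.startswith('    def ', p + 1)
--                                 or text.startswith(bar, p + 1)):
--             return text[:start] + text[p:]
--     return text
-- ===== Notes on version B (the rewrite author's own statement) =====
-- stated objective: alternative
-- what changed: A runs two independent text.find passes (one per marker) and takes min() of the found positions; B makes a single forward scan over positions after the def line, stopping at the first newline followed by ' def ' or the comment bar.
import Mathlib
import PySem

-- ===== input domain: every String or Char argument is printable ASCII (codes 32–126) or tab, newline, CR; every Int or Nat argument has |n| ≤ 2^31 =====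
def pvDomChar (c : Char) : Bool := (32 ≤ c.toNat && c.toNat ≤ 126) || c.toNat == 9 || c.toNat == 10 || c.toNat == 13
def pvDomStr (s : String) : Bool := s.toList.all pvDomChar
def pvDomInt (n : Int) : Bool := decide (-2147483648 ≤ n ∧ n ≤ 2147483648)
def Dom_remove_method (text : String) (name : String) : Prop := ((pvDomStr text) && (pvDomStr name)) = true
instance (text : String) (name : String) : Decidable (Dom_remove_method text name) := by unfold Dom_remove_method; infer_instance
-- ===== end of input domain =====

-- B replaces A's two independent text.find calls plus min() by one forward scan
-- for the first qualifying newline position (alternative decomposition, same result).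

-- ===== PORT A =====
def remove_method (text : String) (name : String) : String :=
  let start := PySem.Str.find text ("    def " ++ name ++ "(")
  if start = -1 then text
  else
    let candidates :=
      [("\n    def " : String), ("\n    # ==========================================" : String)].foldl
        (fun acc marker =>
          let pos := PySem.Str.findFrom text marker (start + 10)
          if pos ≠ -1 then acc ++ [pos] else acc) []
    if candidates = [] then text
    else
      match PySem.List.min? candidates (fun x => x) with
      | some m => PySem.Str.slice text none (some start) ++ PySem.Str.slice text (some m) none
      | none => text   -- unreachable: candidates ≠ []

-- ===== PORT B =====
-- the for-p loop of Source B: scan the suffix of the text starting at absolute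
-- position p, returning the first p whose char is '\n' followed by d1 or d2
def pvScanB (d1 d2 : List Char) : Nat → List Char → Option Nat
  | _, [] => none
  | p, c :: rest =>
    if c = '\n' ∧ (d1 <+: rest ∨ d2 <+: rest) then some p
    else pvScanB d1 d2 (p + 1) rest

def remove_method_alt (text : String) (name : String) : String :=
  let start := PySem.Str.find text ("    def " ++ name ++ "(")
  if start = -1 then text
  else
    let bar := ("    # " : String).toList ++ List.replicate 42 '='   -- '    # ' + '=' * 42
    let cs := text.toList
    let k := start.toNat + 10
    match pvScanB ("    def " : String).toList bar k (cs.drop k) with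
    | some p => String.ofList (cs.take start.toNat ++ cs.drop p)
    | none => text

-- ===== PRECONDITION & SPEC =====
def Spec_remove_method (text : String) (name : String) (out : String) : Prop := out = remove_method_alt text name
instance (text : String) (name : String) (out : String) : Decidable (Spec_remove_method text name out) := by unfold Spec_remove_method; infer_instance

-- ===== CLAIM (what is proved, stated in full; the proofs are below) =====
def Claim_equal_remove_method : Prop := ∀ (text : String) (name : String), Dom_remove_method text name → Spec_remove_method text name (remove_method text name)

-- ===== LEMMAS AND PROOFS =====

-- "a newline followed by d1 or d2 occurs at offset j of l"
def pvQ (d1 d2 l : List Char) (j : Nat) : Prop :=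
  ('\n' :: d1) <+: l.drop j ∨ ('\n' :: d2) <+: l.drop j

theorem pvQ_zero_iff (d1 d2 : List Char) (c : Char) (rest : List Char) :
    pvQ d1 d2 (c :: rest) 0 ↔ (c = '\n' ∧ (d1 <+: rest ∨ d2 <+: rest)) := by
  simp [pvQ, List.cons_prefix_cons, eq_comm]
  tauto

theorem pvQ_succ (d1 d2 : List Char) (c : Char) (rest : List Char) (j : Nat) :
    pvQ d1 d2 (c :: rest) (j + 1) ↔ pvQ d1 d2 rest j := by
  simp [pvQ]

theorem pvScanB_eq_none (d1 d2 l : List Char) (k : Nat)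
    (h : ∀ j, ¬ pvQ d1 d2 l j) : pvScanB d1 d2 k l = none := by
  induction l generalizing k with
  | nil => rfl
  | cons c rest ih =>
    have h0 := h 0
    rw [pvQ_zero_iff] at h0
    simp only [pvScanB, if_neg h0]
    exact ih _ (fun j => by have := h (j + 1); rwa [pvQ_succ] at this)

theorem pvScanB_eq_some (d1 d2 : List Char) (j : Nat) :
    ∀ (l : List Char) (k : Nat), pvQ d1 d2 l j → (∀ i, i < j → ¬ pvQ d1 d2 l i) →
    pvScanB d1 d2 k l = some (k + j) := by
  induction j with
  | zero =>
    intro l k hj _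
    cases l with
    | nil => simp [pvQ] at hj
    | cons c rest =>
      rw [pvQ_zero_iff] at hj
      simp [pvScanB, if_pos hj]
  | succ j ih =>
    intro l k hj hmin
    cases l with
    | nil => simp [pvQ] at hj
    | cons c rest =>
      have h0 : ¬ pvQ d1 d2 (c :: rest) 0 := hmin 0 (Nat.succ_pos j)
      rw [pvQ_zero_iff] at h0
      simp only [pvScanB, if_neg h0]
      rw [pvQ_succ] at hj
      have := ih rest (k + 1) hj
        (fun i hi => by have := hmin (i + 1) (by omega); rwa [pvQ_succ] at this)
      rw [this]
      congr 1
      omega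

theorem pv_findFrom_past (s sub : List Char) (k : Nat) (h : s.length < k) :
    PySem.Chars.findFrom s sub (k : Int) none = -1 := by
  simp only [PySem.Chars.findFrom]
  split_ifs with h1 h2 <;> first | rfl | (exfalso; omega)


theorem pv_out_eq (text : String) (st m : Int) (h0 : 0 ≤ st) (hm : 0 ≤ m) :
    PySem.Str.slice text none (some st) ++ PySem.Str.slice text (some m) =
    String.ofList (text.toList.take st.toNat ++ text.toList.drop m.toNat) := by
  refine String.toList_inj.mp ?_
  simp only [String.toList_append, PySem.Str.toList_slice, PySem.Chars.slice_eq_listSlice]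
  rw [PySem.List.slice_to _ h0, PySem.List.slice_from _ hm]
  simp

theorem pv_main (text name : String) :
    remove_method text name = remove_method_alt text name := by
  simp only [remove_method, remove_method_alt, PySem.Str.find, PySem.Str.findFrom_eq]
  set s := text.toList with hs
  set pat := ("    def " ++ name ++ "(" : String).toList with hpat
  by_cases h0 : PySem.Chars.find s pat = -1
  · simp [h0]
  · simp only [if_neg h0]
    set st := PySem.Chars.find s pat with hstdef
    have hst0 : 0 ≤ st := by have := PySem.Chars.neg_one_le_find s pat; omega
    set k : Nat := st.toNat + 10 with hkdef
    have hc : st + 10 = (k : Int) := by omega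
    rw [hc]
    set d1 := ("    def " : String).toList with hd1
    set d2 := (("    # " : String).toList ++ List.replicate 42 '=') with hd2
    have hm1 : ("\n    def " : String).toList = '\n' :: d1 := by decide
    have hm2 : ("\n    # ==========================================" : String).toList = '\n' :: d2 := by decide
    simp only [List.foldl]
    rw [hm1, hm2]
    set f1 := PySem.Chars.findFrom s ('\n' :: d1) (k : Int) none with hf1def
    set f2 := PySem.Chars.findFrom s ('\n' :: d2) (k : Int) none with hf2def
    rcases le_or_gt k s.length with hkle | hkgt
    · -- k within the text
      have hdd : ∀ (j : Nat), (s.drop k).drop j = s.drop (k + j) := by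
        intro j; rw [List.drop_drop]
      have hnone1 : f1 = -1 → ∀ q, k ≤ q → ¬ ('\n' :: d1) <+: s.drop q := by
        intro h q hq hp
        have hinf := (PySem.Chars.findFrom_natCast_eq_neg_one_iff s ('\n' :: d1) k hkle).mp h
        apply hinf
        rw [← PySem.Chars.isIn_iff_infix, ← PySem.Chars.exists_prefix_drop_iff_isIn]
        exact ⟨q - k, by rw [hdd]; have hq' : k + (q - k) = q := by omega
                         rw [hq']; exact hp⟩
      have hnone2 : f2 = -1 → ∀ q, k ≤ q → ¬ ('\n' :: d2) <+: s.drop q := by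
        intro h q hq hp
        have hinf := (PySem.Chars.findFrom_natCast_eq_neg_one_iff s ('\n' :: d2) k hkle).mp h
        apply hinf
        rw [← PySem.Chars.isIn_iff_infix, ← PySem.Chars.exists_prefix_drop_iff_isIn]
        exact ⟨q - k, by rw [hdd]; have hq' : k + (q - k) = q := by omega
                         rw [hq']; exact hp⟩
      by_cases h1 : f1 = -1 <;> by_cases h2 : f2 = -1
      · -- neither marker occurs: both return the text unchanged
        have hscan : pvScanB d1 d2 k (s.drop k) = none := by
          apply pvScanB_eq_none
          intro j hQ
          rcases hQ with hp | hp
          · exact hnone1 h1 (k + j) (by omega) (by rwa [hdd] at hp)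
          · exact hnone2 h2 (k + j) (by omega) (by rwa [hdd] at hp)
        simp [h1, h2, hscan]
      · -- only the comment bar occurs
        obtain ⟨hk2, hpre2, hmin2⟩ := PySem.Chars.findFrom_natCast_spec s ('\n' :: d2) k hkle h2
        have h0f2 : (0 : Int) ≤ f2 := by omega
        have hscan : pvScanB d1 d2 k (s.drop k) = some f2.toNat := by
          have hsc := pvScanB_eq_some d1 d2 (f2.toNat - k) (s.drop k) k ?_ ?_
          · rw [hsc]; congr 1; omega
          · unfold pvQ; rw [hdd]; right
            have e : k + (f2.toNat - k) = f2.toNat := by omega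
            rw [e]; exact hpre2
          · intro i hi; unfold pvQ; rw [hdd]; exact not_or.mpr ⟨hnone1 h1 (k + i) (by omega), hmin2 (k + i) (by omega) (by omega)⟩
        rw [hscan]
        simp only [h1, h2, ne_eq, not_true_eq_false, if_false, not_false_eq_true, if_true,
          List.nil_append]
        simp [PySem.List.min?_id_cons, pv_out_eq text st f2 hst0 h0f2]
        rw [hs]
      · -- only a sibling def occurs
        obtain ⟨hk1, hpre1, hmin1⟩ := PySem.Chars.findFrom_natCast_spec s ('\n' :: d1) k hkle h1
        have h0f1 : (0 : Int) ≤ f1 := by omega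
        have hscan : pvScanB d1 d2 k (s.drop k) = some f1.toNat := by
          have hsc := pvScanB_eq_some d1 d2 (f1.toNat - k) (s.drop k) k ?_ ?_
          · rw [hsc]; congr 1; omega
          · unfold pvQ; rw [hdd]; left
            have e : k + (f1.toNat - k) = f1.toNat := by omega
            rw [e]; exact hpre1
          · intro i hi; unfold pvQ; rw [hdd]; exact not_or.mpr ⟨hmin1 (k + i) (by omega) (by omega), hnone2 h2 (k + i) (by omega)⟩
        rw [hscan]
        simp only [h1, h2, ne_eq, not_false_eq_true, if_true, not_true_eq_false, if_false,
          List.nil_append]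
        simp [PySem.List.min?_id_cons, pv_out_eq text st f1 hst0 h0f1]
        rw [hs]
      · -- both occur: the scan stops at the earlier of the two
        obtain ⟨hk1, hpre1, hmin1⟩ := PySem.Chars.findFrom_natCast_spec s ('\n' :: d1) k hkle h1
        obtain ⟨hk2, hpre2, hmin2⟩ := PySem.Chars.findFrom_natCast_spec s ('\n' :: d2) k hkle h2
        have h0f1 : (0 : Int) ≤ f1 := by omega
        have h0f2 : (0 : Int) ≤ f2 := by omega
        have h0m : (0 : Int) ≤ min f1 f2 := le_min h0f1 h0f2
        have hscan : pvScanB d1 d2 k (s.drop k) = some ((min f1 f2).toNat) := by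
          rcases le_total f1 f2 with hle | hle
          · rw [min_eq_left hle]
            have hsc := pvScanB_eq_some d1 d2 (f1.toNat - k) (s.drop k) k ?_ ?_
            · rw [hsc]; congr 1; omega
            · unfold pvQ; rw [hdd]; left
              have e : k + (f1.toNat - k) = f1.toNat := by omega
              rw [e]; exact hpre1
            · intro i hi; unfold pvQ; rw [hdd]; exact not_or.mpr ⟨hmin1 (k + i) (by omega) (by omega), hmin2 (k + i) (by omega) (by omega)⟩
          · rw [min_eq_right hle]
            have hsc := pvScanB_eq_some d1 d2 (f2.toNat - k) (s.drop k) k ?_ ?_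
            · rw [hsc]; congr 1; omega
            · unfold pvQ; rw [hdd]; right
              have e : k + (f2.toNat - k) = f2.toNat := by omega
              rw [e]; exact hpre2
            · intro i hi; unfold pvQ; rw [hdd]; exact not_or.mpr ⟨hmin1 (k + i) (by omega) (by omega), hmin2 (k + i) (by omega) (by omega)⟩
        rw [hscan]
        simp only [h1, h2, ne_eq, not_false_eq_true, if_true, List.nil_append]
        simp [PySem.List.min?_id_cons, pv_out_eq text st (min f1 f2) hst0 h0m]
        rw [hs]
    · -- start + 10 is past the end of the text
      have hpast1 : f1 = -1 := pv_findFrom_past s ('\n' :: d1) k hkgt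
      have hpast2 : f2 = -1 := pv_findFrom_past s ('\n' :: d2) k hkgt
      have hnil : s.drop k = [] := List.drop_eq_nil_of_le (le_of_lt hkgt)
      simp [hpast1, hpast2, hnil, pvScanB]

-- ===== VERDICT (by name: the statement is the Claim_ definition above) =====
theorem remove_method_spec : Claim_equal_remove_method := by
  intro text name _
  unfold Spec_remove_method
  exact pv_main text name
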